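-- pv_equiv track=rewrite | github.com/tomhyhan/PEuler | joys.py | solution
-- ===== SOURCE A (Python) =====
-- def solution(name):
--     moves = 0
--     min_move = len(name) - 1
--
--     for i in range(len(name)):
--         moves += (13 - abs(ord(name[i]) - ord('N')))
--
--         next = i + 1
--         cnt = 0
--         while next < len(name) and name[next] == 'A':
--             cnt += 1
--             next += 1
--
--         min_move = min(min_move, i + len(name) - 1- cnt, i + 2 * (len(name) - next))
--     moves += min_move
--     return moves
-- ===== SOURCE B (Python) =====
-- def solution(name):
--     n = len(name)
--     total = 0
--     best = n - 1
--     run = 0  # length of the consecutive letter-A run starting at index i+1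
--     for i in range(n - 1, -1, -1):
--         c = name[i]
--         total += 13 - abs(ord(c) - 78)
--         best = min(best, i + n - 1 - run, i + 2 * (n - (i + 1 + run)))
--         run = run + 1 if c == 'A' else 0
--     return total + best
-- ===== Notes on version B (the rewrite author's own statement) =====
-- stated objective: alternative
-- what changed: Replaced the per-index inner while-scan that recounts the run of consecutive letter-A characters (worst-case quadratic) by a single right-to-left pass that maintains that run length incrementally.
import Mathlib
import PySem

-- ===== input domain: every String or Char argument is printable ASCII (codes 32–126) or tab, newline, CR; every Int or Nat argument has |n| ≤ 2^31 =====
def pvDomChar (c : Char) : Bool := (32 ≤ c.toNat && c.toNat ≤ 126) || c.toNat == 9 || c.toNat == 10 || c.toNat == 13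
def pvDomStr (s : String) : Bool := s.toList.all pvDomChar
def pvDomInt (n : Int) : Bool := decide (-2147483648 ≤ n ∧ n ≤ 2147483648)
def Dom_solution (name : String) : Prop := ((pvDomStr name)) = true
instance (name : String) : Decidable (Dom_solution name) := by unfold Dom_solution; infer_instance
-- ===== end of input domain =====

-- B replaces A's inner while-scan that recounts the letter-A run after each index by one
-- right-to-left pass maintaining that run length incrementally (objective: alternative).

-- ===== PORT A =====
-- A's inner while loop: length of the letter-A run starting at index `next`
def solWhile (cs : List Char) (next : Nat) : Nat :=
  if _h : next < cs.length then
    if cs.getD next ' ' = 'A' then solWhile cs (next + 1) + 1 else 0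
  else 0
termination_by cs.length - next

def solution (name : String) : Int :=
  let cs := name.toList
  let n := cs.length
  let st := (List.range n).foldl (fun (st : Int × Int) i =>
    let moves := st.1 + ((13 : Int) - |((cs.getD i ' ').toNat : Int) - 78|)
    let cnt := solWhile cs (i + 1)
    let mm := min st.2 (min ((i : Int) + (n : Int) - 1 - (cnt : Int))
                           ((i : Int) + 2 * ((n : Int) - ((i : Int) + 1 + (cnt : Int)))))
    (moves, mm)) ((0 : Int), (n : Int) - 1)
  st.1 + st.2

-- ===== PORT B =====
-- one iteration of B's descending loop, at index i; state = (total, best, run)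
def altStep (cs : List Char) (n : Nat) (i : Nat) (st : Int × Int × Nat) : Int × Int × Nat :=
  let c := cs.getD i ' '
  let total := st.1 + ((13 : Int) - |(c.toNat : Int) - 78|)
  let best := min st.2.1 (min ((i : Int) + (n : Int) - 1 - (st.2.2 : Int))
                             ((i : Int) + 2 * ((n : Int) - ((i : Int) + 1 + (st.2.2 : Int)))))
  let run := if c = 'A' then st.2.2 + 1 else 0
  (total, best, run)

-- state after the first k iterations of `for i in range(n-1, -1, -1)` (indices n-1 … n-k)
def altLoop (cs : List Char) (n : Nat) : Nat → Int × Int × Nat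
  | 0 => ((0 : Int), (n : Int) - 1, (0 : Nat))
  | k + 1 => altStep cs n (n - (k + 1)) (altLoop cs n k)

def solution_alt (name : String) : Int :=
  let cs := name.toList
  let n := cs.length
  let st := altLoop cs n n
  st.1 + st.2.1

-- ===== PRECONDITION & SPEC =====
def Spec_solution (name : String) (out : Int) : Prop := out = solution_alt name
instance (name : String) (out : Int) : Decidable (Spec_solution name out) := by unfold Spec_solution; infer_instance

-- ===== CLAIM (what is proved, stated in full; the proofs are below) =====
def Claim_equal_solution : Prop := ∀ (name : String), Dom_solution name → Spec_solution name (solution name)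

-- ===== LEMMAS AND PROOFS =====

-- per-index character score and positioning candidate (shared characterisation)
def pvSc (cs : List Char) (i : Nat) : Int := (13 : Int) - |((cs.getD i ' ').toNat : Int) - 78|

def pvG (cs : List Char) (n : Nat) (i : Nat) : Int :=
  min ((i : Int) + (n : Int) - 1 - (solWhile cs (i + 1) : Int))
      ((i : Int) + 2 * ((n : Int) - ((i : Int) + 1 + (solWhile cs (i + 1) : Int))))

-- A's foldl splits into an independent sum and an independent min-fold
lemma A_split (cs : List Char) (n : Nat) (l : List Nat) (a b : Int) :
    l.foldl (fun (st : Int × Int) i =>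
      let moves := st.1 + ((13 : Int) - |((cs.getD i ' ').toNat : Int) - 78|)
      let cnt := solWhile cs (i + 1)
      let mm := min st.2 (min ((i : Int) + (n : Int) - 1 - (cnt : Int))
                             ((i : Int) + 2 * ((n : Int) - ((i : Int) + 1 + (cnt : Int)))))
      (moves, mm)) (a, b)
    = (l.foldl (fun s i => s + pvSc cs i) a, l.foldl (fun m i => min m (pvG cs n i)) b) := by
  induction l generalizing a b with
  | nil => rfl
  | cons x xs ih => simp only [List.foldl_cons]; exact ih _ _

-- a left-commutative fold may absorb its first element last
lemma foldl_pull {α : Type} (f : Int → α → Int) (hf : ∀ b i j, f (f b i) j = f (f b j) i) :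
    ∀ (l : List α) (b : Int) (x : α), f (l.foldl f b) x = l.foldl f (f b x) := by
  intro l
  induction l with
  | nil => intro b x; rfl
  | cons y ys ih => intro b x; simp only [List.foldl_cons, ← ih, hf]

-- folding a left-commutative operation over the reverse gives the same result
lemma foldl_reverse_comm {α : Type} (f : Int → α → Int) (hf : ∀ b i j, f (f b i) j = f (f b j) i) :
    ∀ (l : List α) (b : Int), l.reverse.foldl f b = l.foldl f b := by
  intro l
  induction l with
  | nil => intro b; rfl
  | cons x xs ih =>
      intro b
      simp only [List.reverse_cons, List.foldl_append, List.foldl_cons, List.foldl_nil, ih,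
        foldl_pull f hf]

-- B's loop invariant: after k ≤ n iterations the state is the sum / min-fold over the
-- processed descending indices, and `run` is the letter-A run length starting at index n-k.
lemma B_loop (cs : List Char) (n : Nat) (hn : n = cs.length) :
    ∀ k, k ≤ n →
      altLoop cs n k
        = ((List.range' (n - k) k).reverse.foldl (fun s i => s + pvSc cs i) 0,
           (List.range' (n - k) k).reverse.foldl (fun m i => min m (pvG cs n i)) ((n : Int) - 1),
           solWhile cs (n - k)) := by
  intro k
  induction k with
  | zero =>
      intro _
      simp only [altLoop, List.range', List.reverse_nil, List.foldl_nil, Nat.sub_zero]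
      rw [solWhile]
      simp [hn]
  | succ k ih =>
      intro hk
      have hk' : k ≤ n := Nat.le_of_succ_le hk
      have hidx : n - (k + 1) + 1 = n - k := by omega
      have hlt : n - (k + 1) < cs.length := by omega
      have hrange : List.range' (n - (k + 1)) (k + 1) = (n - (k + 1)) :: List.range' (n - k) k := by
        rw [List.range'_succ, hidx]
      rw [altLoop, ih hk']
      simp only [altStep, hrange, List.reverse_cons, List.foldl_append, List.foldl_cons,
        List.foldl_nil, Prod.mk.injEq]
      refine ⟨rfl, ?_, ?_⟩
      · unfold pvG; rw [hidx]
      · conv_rhs => rw [solWhile]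
        simp only [hlt, dif_pos, hidx]

-- ===== VERDICT (by name: the statement is the Claim_ definition above) =====
theorem solution_spec : Claim_equal_solution := by
  intro name _
  unfold Spec_solution solution solution_alt
  simp only
  rw [A_split, B_loop name.toList name.toList.length rfl name.toList.length (le_refl _)]
  simp only [Nat.sub_self, ← List.range_eq_range']
  rw [foldl_reverse_comm _ (by intro b i j; omega),
      foldl_reverse_comm _ (by intro b i j; omega)]
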